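-- pv_equiv track=rewrite | github.com/seyacat/Simple_Vtuber | datagen/scripts/01-generate_texts.py | generar_combinaciones_por_vocal
-- ===== SOURCE A (Python) =====
-- CONSONANTES_ESPANOL = [
--     'b', 'c', 'd', 'f', 'g', 'h', 'j', 'k', 'l', 'm',
--     'n', 'ñ', 'p', 'q', 'r', 's', 't', 'v', 'w', 'x', 'y', 'z'
-- ]
--
-- COMBINACIONES_ESPECIALES = ['ch', 'll', 'rr']
--
-- def generar_combinaciones_por_vocal(vocal):
--     """
--     Genera todas las combinaciones para una vocal específica.
--
--     Args:
--         vocal: Vocal en mayúscula ('A', 'E', 'I', 'O', 'U')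
--
--     Returns:
--         Lista de combinaciones para esa vocal
--     """
--     vocal_lower = vocal.lower()
--     combinaciones = []
--
--     # Vocal sola (sin consonante)
--     combinaciones.append({
--         'texto': vocal_lower,
--         'consonante': '',
--         'vocal': vocal,
--         'tipo': 'vocal_sola',
--         'direccion': 'vocal_sola'
--     })
--
--     # Combinaciones consonante + vocal (CV)
--     for consonante in CONSONANTES_ESPANOL:
--         texto = f"{consonante}{vocal_lower}"
--         combinaciones.append({
--             'texto': texto,
--             'consonante': consonante,
--             'vocal': vocal,
--             'tipo': 'cv',
--             'direccion': 'consonante_vocal'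
--         })
--
--     # Combinaciones vocal + consonante (VC)
--     for consonante in CONSONANTES_ESPANOL:
--         texto = f"{vocal_lower}{consonante}"
--         combinaciones.append({
--             'texto': texto,
--             'consonante': consonante,
--             'vocal': vocal,
--             'tipo': 'vc',
--             'direccion': 'vocal_consonante'
--         })
--
--     # Combinaciones con dígrafos (CV)
--     for especial in COMBINACIONES_ESPECIALES:
--         texto = f"{especial}{vocal_lower}"
--         combinaciones.append({
--             'texto': texto,
--             'consonante': especial,
--             'vocal': vocal,
--             'tipo': 'especial_cv',
--             'direccion': 'consonante_vocal'
--         })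
--
--     # Combinaciones con dígrafos (VC)
--     for especial in COMBINACIONES_ESPECIALES:
--         texto = f"{vocal_lower}{especial}"
--         combinaciones.append({
--             'texto': texto,
--             'consonante': especial,
--             'vocal': vocal,
--             'tipo': 'especial_vc',
--             'direccion': 'vocal_consonante'
--         })
--
--     return combinaciones
-- ===== SOURCE B (Python) =====
-- CONSONANTES_ESPANOL = [
--     'b', 'c', 'd', 'f', 'g', 'h', 'j', 'k', 'l', 'm',
--     'n', 'ñ', 'p', 'q', 'r', 's', 't', 'v', 'w', 'x', 'y', 'z'
-- ]
--
-- COMBINACIONES_ESPECIALES = ['ch', 'll', 'rr']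
--
-- def generar_combinaciones_por_vocal(vocal):
--     v = vocal.lower()
--
--     def entrada(texto, consonante, tipo, direccion):
--         return {'texto': texto, 'consonante': consonante, 'vocal': vocal,
--                 'tipo': tipo, 'direccion': direccion}
--
--     # Single pass over all onsets; dispatch simple vs digraph by length,
--     # collecting the four blocks at once, then concatenate in order.
--     cv, vc, ecv, evc = [], [], [], []
--     for c in CONSONANTES_ESPANOL + COMBINACIONES_ESPECIALES:
--         if len(c) == 1:
--             cv.append(entrada(c + v, c, 'cv', 'consonante_vocal'))
--             vc.append(entrada(v + c, c, 'vc', 'vocal_consonante'))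
--         else:
--             ecv.append(entrada(c + v, c, 'especial_cv', 'consonante_vocal'))
--             evc.append(entrada(v + c, c, 'especial_vc', 'vocal_consonante'))
--
--     return [entrada(v, '', 'vocal_sola', 'vocal_sola')] + cv + vc + ecv + evc
-- ===== Notes on version B (the rewrite author's own statement) =====
-- stated objective: alternative
-- what changed: Instead of A's four staged loops appending to one list, B makes a single pass over the merged consonant+digraph list, dispatching on the onset's length to fill four block accumulators (cv, vc, especial_cv, especial_vc) simultaneously, then concatenates the blocks in A's order.
import Mathlib
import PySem

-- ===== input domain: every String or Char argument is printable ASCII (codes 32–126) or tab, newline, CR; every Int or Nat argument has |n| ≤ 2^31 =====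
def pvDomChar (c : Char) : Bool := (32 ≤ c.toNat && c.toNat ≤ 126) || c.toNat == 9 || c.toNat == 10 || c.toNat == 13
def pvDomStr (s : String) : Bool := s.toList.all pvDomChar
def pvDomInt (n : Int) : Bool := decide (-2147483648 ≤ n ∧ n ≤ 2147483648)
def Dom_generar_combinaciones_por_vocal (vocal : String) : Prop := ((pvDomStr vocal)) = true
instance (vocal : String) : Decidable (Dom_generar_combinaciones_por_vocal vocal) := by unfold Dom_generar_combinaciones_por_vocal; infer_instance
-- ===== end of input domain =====

-- B builds the four blocks in one pass over the merged onset list (length dispatch) and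
-- concatenates them, instead of A's four staged append loops (objective: alternative).


-- ===== PORT A =====
def CONSONANTES_ESPANOL : List String :=
  ["b", "c", "d", "f", "g", "h", "j", "k", "l", "m",
   "n", "ñ", "p", "q", "r", "s", "t", "v", "w", "x", "y", "z"]

def COMBINACIONES_ESPECIALES : List String := ["ch", "ll", "rr"]

def generar_combinaciones_por_vocal (vocal : String) : List (List (String × String)) :=
  let vocal_lower := PySem.Str.lower vocal
  let combinaciones : List (List (String × String)) :=
    [[("texto", vocal_lower), ("consonante", ""), ("vocal", vocal),
      ("tipo", "vocal_sola"), ("direccion", "vocal_sola")]]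
  let combinaciones := CONSONANTES_ESPANOL.foldl (fun acc consonante =>
    acc ++ [[("texto", consonante ++ vocal_lower), ("consonante", consonante), ("vocal", vocal),
             ("tipo", "cv"), ("direccion", "consonante_vocal")]]) combinaciones
  let combinaciones := CONSONANTES_ESPANOL.foldl (fun acc consonante =>
    acc ++ [[("texto", vocal_lower ++ consonante), ("consonante", consonante), ("vocal", vocal),
             ("tipo", "vc"), ("direccion", "vocal_consonante")]]) combinaciones
  let combinaciones := COMBINACIONES_ESPECIALES.foldl (fun acc especial =>
    acc ++ [[("texto", especial ++ vocal_lower), ("consonante", especial), ("vocal", vocal),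
             ("tipo", "especial_cv"), ("direccion", "consonante_vocal")]]) combinaciones
  let combinaciones := COMBINACIONES_ESPECIALES.foldl (fun acc especial =>
    acc ++ [[("texto", vocal_lower ++ especial), ("consonante", especial), ("vocal", vocal),
             ("tipo", "especial_vc"), ("direccion", "vocal_consonante")]]) combinaciones
  combinaciones

-- ===== PORT B =====
-- entrada: B's helper building one dict
def pvEntrada (vocal texto consonante tipo direccion : String) : List (String × String) :=
  [("texto", texto), ("consonante", consonante), ("vocal", vocal),
   ("tipo", tipo), ("direccion", direccion)]

def generar_combinaciones_por_vocal_alt (vocal : String) : List (List (String × String)) :=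
  let v := PySem.Str.lower vocal
  -- single pass over the merged onset list with four accumulators
  let blocks := (CONSONANTES_ESPANOL ++ COMBINACIONES_ESPECIALES).foldl
    (fun (acc : List (List (String × String)) × List (List (String × String)) ×
                 List (List (String × String)) × List (List (String × String))) c =>
      let (cv, vc, ecv, evc) := acc
      if c.length = 1 then  -- len(c) == 1; String.length counts chars, exact here
        (cv ++ [pvEntrada vocal (c ++ v) c "cv" "consonante_vocal"],
         vc ++ [pvEntrada vocal (v ++ c) c "vc" "vocal_consonante"], ecv, evc)
      else
        (cv, vc,
         ecv ++ [pvEntrada vocal (c ++ v) c "especial_cv" "consonante_vocal"],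
         evc ++ [pvEntrada vocal (v ++ c) c "especial_vc" "vocal_consonante"]))
    ([], [], [], [])
  [pvEntrada vocal v "" "vocal_sola" "vocal_sola"] ++
    blocks.1 ++ blocks.2.1 ++ blocks.2.2.1 ++ blocks.2.2.2

-- ===== PRECONDITION & SPEC =====
def Spec_generar_combinaciones_por_vocal (vocal : String) (out : List (List (String × String))) : Prop := out = generar_combinaciones_por_vocal_alt vocal
instance (vocal : String) (out : List (List (String × String))) : Decidable (Spec_generar_combinaciones_por_vocal vocal out) := by unfold Spec_generar_combinaciones_por_vocal; infer_instance

-- ===== CLAIM (what is proved, stated in full; the proofs are below) =====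
def Claim_equal_generar_combinaciones_por_vocal : Prop := ∀ (vocal : String), Dom_generar_combinaciones_por_vocal vocal → Spec_generar_combinaciones_por_vocal vocal (generar_combinaciones_por_vocal vocal)

-- ===== LEMMAS AND PROOFS =====

-- ===== VERDICT (by name: the statement is the Claim_ definition above) =====
set_option maxRecDepth 10000 in
set_option maxHeartbeats 2000000 in
theorem generar_combinaciones_por_vocal_spec : Claim_equal_generar_combinaciones_por_vocal := by
  intro vocal _
  unfold Spec_generar_combinaciones_por_vocal generar_combinaciones_por_vocal
    generar_combinaciones_por_vocal_alt pvEntrada CONSONANTES_ESPANOL COMBINACIONES_ESPECIALES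
  simp only [List.foldl_cons, List.foldl_nil,
    show ("b".length = 1) = True from by decide, show ("c".length = 1) = True from by decide, show ("d".length = 1) = True from by decide, show ("f".length = 1) = True from by decide, show ("g".length = 1) = True from by decide, show ("h".length = 1) = True from by decide, show ("j".length = 1) = True from by decide, show ("k".length = 1) = True from by decide, show ("l".length = 1) = True from by decide, show ("m".length = 1) = True from by decide, show ("n".length = 1) = True from by decide, show ("ñ".length = 1) = True from by decide, show ("p".length = 1) = True from by decide, show ("q".length = 1) = True from by decide, show ("r".length = 1) = True from by decide, show ("s".length = 1) = True from by decide, show ("t".length = 1) = True from by decide, show ("v".length = 1) = True from by decide, show ("w".length = 1) = True from by decide, show ("x".length = 1) = True from by decide, show ("y".length = 1) = True from by decide, show ("z".length = 1) = True from by decide,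
    show ("ch".length = 1) = False from by decide, show ("ll".length = 1) = False from by decide, show ("rr".length = 1) = False from by decide,
    if_true, if_false, List.cons_append, List.nil_append]
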